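-- pv_equiv track=rewrite | github.com/microsoft/mssql-python | mssql_python/connection_string_builder.py | _escape_value
-- ===== SOURCE A (Python) =====
-- def _escape_value(value: str) -> str:
--     """
--     Escape a parameter value if it contains special characters.
--
--     Per MS-ODBCSTR specification:
--     - Values containing ';', '{', '}', '=', or spaces should be braced for safety
--     - '}' inside braced values is escaped as '}}'
--     - '{' inside braced values is escaped as '{{'
--
--     Args:
--         value: Parameter value to escape
--
--     Returns:
--         Escaped value (possibly wrapped in braces)
--
--     Examples:
--         >>> builder = _ConnectionStringBuilder()
--         >>> builder._escape_value("localhost")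
--         'localhost'
--         >>> builder._escape_value("local;host")
--         '{local;host}'
--         >>> builder._escape_value("p}w{d")
--         '{p}}w{{d}'
--         >>> builder._escape_value("ODBC Driver 18 for SQL Server")
--         '{ODBC Driver 18 for SQL Server}'
--     """
--     if not value:
--         return value
--
--     # Check if value contains special characters that require bracing
--     # Include spaces and = for safety, even though technically not always required
--     needs_braces = any(ch in value for ch in ';{}= ')
--
--     if needs_braces:
--         # Escape existing braces by doubling them
--         escaped = value.replace('}', '}}').replace('{', '{{')
--         return f'{{{escaped}}}'
--     else:
--         return value
-- ===== SOURCE B (Python) =====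
-- def _escape_value(value: str) -> str:
--     """Single pass: build the brace-escaped text and the needs-braces flag together."""
--     if not value:
--         return value
--     out = []
--     needs_braces = False
--     for ch in value:
--         if ch == '{':
--             out.append('{{')
--         elif ch == '}':
--             out.append('}}')
--         else:
--             out.append(ch)
--         if ch in ';{}= ':
--             needs_braces = True
--     if needs_braces:
--         return '{' + ''.join(out) + '}'
--     return value
-- ===== Notes on version B (the rewrite author's own statement) =====
-- stated objective: alternative
-- what changed: Replaces A's three separate scans (the any() membership test over the special characters plus two chained str.replace passes) with one loop over the characters that builds the escaped text and the needs-braces flag simultaneously.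
import Mathlib
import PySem

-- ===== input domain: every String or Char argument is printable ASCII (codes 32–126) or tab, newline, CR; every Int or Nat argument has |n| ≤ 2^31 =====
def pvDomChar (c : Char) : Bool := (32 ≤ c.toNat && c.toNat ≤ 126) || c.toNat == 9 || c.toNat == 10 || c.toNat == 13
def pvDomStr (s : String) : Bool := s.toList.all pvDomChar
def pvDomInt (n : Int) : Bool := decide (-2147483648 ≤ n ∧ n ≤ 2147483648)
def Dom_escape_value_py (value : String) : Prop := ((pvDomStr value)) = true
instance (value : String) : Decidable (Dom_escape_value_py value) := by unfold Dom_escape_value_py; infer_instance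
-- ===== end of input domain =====

-- B replaces A's three scans (any() plus two str.replace passes) with one loop building the escaped text and the flag together; same cost, different decomposition.


-- ===== PORT A =====
def escape_value_py (value : String) : String :=
  if value.isEmpty then value
  else
    -- needs_braces = any(ch in value for ch in ';{}= ')
    let needs_braces := (";{}= ").toList.any (fun ch => PySem.Str.isIn (String.ofList [ch]) value)
    if needs_braces then
      let escaped := PySem.Str.replace (PySem.Str.replace value "}" "}}") "{" "{{"
      "{" ++ escaped ++ "}"
    else value

-- ===== PORT B =====
def escape_value_py_alt (value : String) : String :=
  if value.isEmpty then value
  else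
    let st := value.toList.foldl
      (fun (st : List Char × Bool) ch =>
        ((st.1 ++ (if ch = '{' then ['{', '{'] else if ch = '}' then ['}', '}'] else [ch])),
         (st.2 || (";{}= ").toList.contains ch)))
      ([], false)
    if st.2 then "{" ++ String.ofList st.1 ++ "}" else value

-- ===== PRECONDITION & SPEC =====
def Spec_escape_value_py (value : String) (out : String) : Prop := out = escape_value_py_alt value
instance (value : String) (out : String) : Decidable (Spec_escape_value_py value out) := by unfold Spec_escape_value_py; infer_instance

-- ===== CLAIM (what is proved, stated in full; the proofs are below) =====
def Claim_equal_escape_value_py : Prop := ∀ (value : String), Dom_escape_value_py value → Spec_escape_value_py value (escape_value_py value)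

-- ===== LEMMAS AND PROOFS =====

/-- The escaping of a single character, as B's loop does it. -/
def pvEsc (c : Char) : List Char :=
  if c = '{' then ['{', '{'] else if c = '}' then ['}', '}'] else [c]

lemma foldl_esc (l : List Char) (a : List Char) (b : Bool) :
    l.foldl
      (fun (st : List Char × Bool) ch =>
        ((st.1 ++ (if ch = '{' then ['{', '{'] else if ch = '}' then ['}', '}'] else [ch])),
         (st.2 || (";{}= ").toList.contains ch)))
      (a, b)
    = (a ++ l.flatMap pvEsc, b || l.any (fun c => (";{}= ").toList.contains c)) := by
  induction l generalizing a b with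
  | nil => simp
  | cons c t ih =>
    simp only [List.foldl_cons, ih, List.flatMap_cons, List.any_cons, List.append_assoc,
      Bool.or_assoc, pvEsc]

lemma replace_single (a : Char) (r : List Char) (s : List Char) :
    PySem.Chars.replace s [a] r = s.flatMap (fun c => if c = a then r else [c]) := by
  have go_spec : ∀ (l acc : List Char) (fuel : Nat), l.length ≤ fuel →
      PySem.Chars.replace.go [a] r fuel l acc
        = acc.reverse ++ l.flatMap (fun c => if c = a then r else [c]) := by
    intro l
    induction l with
    | nil =>
      intro acc fuel _
      cases fuel <;> simp [PySem.Chars.replace.go]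
    | cons c t ih =>
      intro acc fuel hf
      cases fuel with
      | zero => simp at hf
      | succ n =>
        have hlen : t.length ≤ n := by simpa using hf
        by_cases hc : c = a
        · subst hc
          have hpref : [c].isPrefixOf (c :: t) = true := by simp [List.isPrefixOf]
          simp [PySem.Chars.replace.go, hpref, ih _ _ hlen]
        · have hpref : [a].isPrefixOf (c :: t) = false := by
            simp [List.isPrefixOf]
            exact fun h => hc h.symm
          simp [PySem.Chars.replace.go, hpref, ih _ _ hlen, hc]
  simp [PySem.Chars.replace, go_spec s [] s.length le_rfl]

/-- The two chained replaces equal B's one-pass escaping. -/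
lemma replace_twice (s : List Char) :
    PySem.Chars.replace (PySem.Chars.replace s ['}'] ['}', '}']) ['{'] ['{', '{']
      = s.flatMap pvEsc := by
  rw [replace_single, replace_single, List.flatMap_assoc]
  refine List.flatMap_congr ?_
  intro c _
  by_cases h1 : c = '}' <;> by_cases h2 : c = '{' <;>
    simp_all [pvEsc]

/-- A's needs_braces test equals B's flag. -/
lemma needs_eq (s : List Char) :
    (";{}= ").toList.any (fun ch => PySem.Chars.isIn [ch] s)
      = s.any (fun c => (";{}= ").toList.contains c) := by
  have single : ∀ (a : Char), PySem.Chars.isIn [a] s = s.contains a := by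
    intro a
    by_cases h : a ∈ s
    · obtain ⟨t1, t2, rfl⟩ := List.mem_iff_append.mp h
      rw [(PySem.Chars.isIn_iff_infix _ _).mpr ⟨t1, t2, by simp⟩]
      simp
    · rw [(PySem.Chars.isIn_eq_false_iff _ _).mpr (fun hi => h (hi.subset (by simp)))]
      simp [h]
  simp only [single]
  cases hb : s.any (fun c => (";{}= ").toList.contains c) with
  | true =>
    simp only [List.any_eq_true, List.contains_eq_mem, decide_eq_true_eq] at hb ⊢
    obtain ⟨c, hc, hm⟩ := hb
    exact ⟨c, hm, hc⟩
  | false =>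
    simp only [List.any_eq_false, List.contains_eq_mem, decide_eq_true_eq] at hb ⊢
    exact fun ch hch hm => hb ch hm hch

-- ===== VERDICT (by name: the statement is the Claim_ definition above) =====
theorem escape_value_py_spec : Claim_equal_escape_value_py := by
  intro value _
  unfold Spec_escape_value_py escape_value_py escape_value_py_alt
  by_cases he : value.isEmpty
  · simp [he]
  · simp only [he, foldl_esc, List.nil_append, Bool.false_eq_true, if_false, Bool.false_or]
    have hn : (";{}= ").toList.any (fun ch => PySem.Str.isIn (String.ofList [ch]) value)
        = value.toList.any (fun c => (";{}= ").toList.contains c) := by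
      have : ∀ ch, PySem.Str.isIn (String.ofList [ch]) value
          = PySem.Chars.isIn [ch] value.toList := by
        intro ch; simp [PySem.Str.isIn]
      simp only [this, needs_eq]
    rw [hn]
    by_cases hb : value.toList.any (fun c => (";{}= ").toList.contains c) = true
    · rw [if_pos hb, if_pos hb]
      apply String.ext
      simp only [String.toList_append, PySem.Str.toList_replace]
      rw [show ("}" : String).toList = ['}'] from rfl, show ("}}" : String).toList = ['}', '}'] from rfl,
        show ("{" : String).toList = ['{'] from rfl, show ("{{" : String).toList = ['{', '{'] from rfl,
        replace_twice, String.toList_ofList]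
    · rw [if_neg hb, if_neg hb]
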